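-- pv_equiv track=rewrite | github.com/kateabr/parallel-ru-ja-corpus | src/main/python/numbers_to_japanese.py | len_two
-- ===== SOURCE A (Python) =====
-- def len_one(convert_num, requested_dict):
--     # Returns single digit conversion, 0-9
--     return requested_dict[convert_num]
--
-- def len_two(convert_num, requested_dict):
--     # Returns the conversion, when number is of length two (10-99)
--     if convert_num[0] == "0":  # if 0 is first, return len_one
--         return len_one(convert_num[1], requested_dict)
--     if convert_num == "10":
--         return requested_dict["10"]  # Exception, if number is 10, simple return 10
--     if convert_num[0] == "1":  # When first number is 1, use ten plus second number
--         return requested_dict["10"] + " " + len_one(convert_num[1], requested_dict)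
--     elif convert_num[1] == "0":  # If ending number is zero, give first number plus 10
--         return len_one(convert_num[0], requested_dict) + " " + requested_dict["10"]
--     else:
--         num_list = []
--         for x in convert_num:
--             num_list.append(requested_dict[x])
--         num_list.insert(1, requested_dict["10"])
--         # Convert to a string (from a list)
--         output = ""
--         for y in num_list:
--             output += y + " "
--         output = output[:len(output) - 1]  # take off the space
--         return output
-- ===== SOURCE B (Python) =====
-- def len_two(convert_num, requested_dict):
--     # Returns the conversion, when number is of length two (10-99)
--     if convert_num[0] == "0":  # leading zero: just the ones digit
--         return requested_dict[convert_num[1]]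
--     # One uniform pass over (digit, place-value) pairs, as in a general
--     # place-value number-to-words algorithm: a zero digit emits nothing,
--     # a digit word is dropped for an implicit '1' before a place word,
--     # and the place word follows any nonzero digit.
--     tokens = []
--     for digit, place in zip(convert_num, ("10", "")):
--         if digit == "0":
--             continue
--         if digit != "1" or not place:
--             tokens.append(requested_dict[digit])
--         if place:
--             tokens.append(requested_dict[place])
--     return " ".join(tokens)
-- ===== Notes on version B (the rewrite author's own statement) =====
-- stated objective: alternative
-- what changed: Replaces A's five-way branch case analysis (explicit '10' check, trailing-zero branch, generic list-build/insert/concat-and-trim) with one uniform place-value loop over (digit, place) pairs — skip zero digits, drop the digit word for an implicit leading '1', emit the place word after any nonzero digit — joined by ' '.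
-- outside the precondition, e.g. on len_two('234', {'2': 'a', '3': 'b', '4': 'c', '10': 't'}): A returns 'a t b c', B returns 'a t b'
import Mathlib
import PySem

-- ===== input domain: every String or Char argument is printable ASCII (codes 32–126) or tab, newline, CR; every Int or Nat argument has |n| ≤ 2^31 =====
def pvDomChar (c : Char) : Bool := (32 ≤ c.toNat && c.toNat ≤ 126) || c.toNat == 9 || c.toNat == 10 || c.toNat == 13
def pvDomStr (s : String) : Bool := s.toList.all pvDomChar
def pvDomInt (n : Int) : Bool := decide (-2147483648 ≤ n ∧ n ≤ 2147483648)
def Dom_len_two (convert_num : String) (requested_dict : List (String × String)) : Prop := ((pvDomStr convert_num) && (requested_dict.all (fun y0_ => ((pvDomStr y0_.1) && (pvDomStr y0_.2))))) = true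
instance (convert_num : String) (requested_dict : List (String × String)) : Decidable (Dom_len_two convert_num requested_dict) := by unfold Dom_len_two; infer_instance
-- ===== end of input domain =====

-- B replaces A's five special-case branches by one uniform place-value loop over (digit, place) pairs; same return value on Pre_.

-- d[k] for a str-keyed dict; the "" default is never reached under Pre_ (a missing key is Python's KeyError, excluded by Pre_)
def dget (requested_dict : List (String × String)) (k : String) : String :=
  ((PySem.Dict.mk requested_dict).get? k).getD ""

-- ===== PORT A =====
def len_one (convert_num : String) (requested_dict : List (String × String)) : String :=
  dget requested_dict convert_num

def len_two (convert_num : String) (requested_dict : List (String × String)) : String :=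
  -- convert_num[0] / convert_num[1]: the ' ' default is never reached under Pre_ (IndexError excluded)
  if (PySem.Str.pyGet? convert_num 0).getD ' ' = '0' then
    len_one (String.ofList [(PySem.Str.pyGet? convert_num 1).getD ' ']) requested_dict
  else if convert_num = "10" then
    dget requested_dict "10"
  else if (PySem.Str.pyGet? convert_num 0).getD ' ' = '1' then
    dget requested_dict "10" ++ " " ++ len_one (String.ofList [(PySem.Str.pyGet? convert_num 1).getD ' ']) requested_dict
  else if (PySem.Str.pyGet? convert_num 1).getD ' ' = '0' then
    len_one (String.ofList [(PySem.Str.pyGet? convert_num 0).getD ' ']) requested_dict ++ " " ++ dget requested_dict "10"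
  else
    let num_list := convert_num.toList.foldl (fun acc x => acc ++ [dget requested_dict (String.ofList [x])]) []
    let num_list := PySem.List.insert num_list 1 (dget requested_dict "10")
    let output := num_list.foldl (fun acc y => acc ++ y ++ " ") ""
    PySem.Str.slice output none (some (PySem.Str.len output - 1))

-- ===== PORT B =====
def len_two_alt (convert_num : String) (requested_dict : List (String × String)) : String :=
  if (PySem.Str.pyGet? convert_num 0).getD ' ' = '0' then   -- default never reached under Pre_
    dget requested_dict (String.ofList [(PySem.Str.pyGet? convert_num 1).getD ' '])
  else
    -- one uniform pass over zip(convert_num, ("10", ""))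
    let tokens := (convert_num.toList.zip ["10", ""]).foldl
      (fun acc dp =>
        if dp.1 = '0' then acc                              -- continue
        else
          let acc := if dp.1 ≠ '1' ∨ dp.2 = "" then acc ++ [dget requested_dict (String.ofList [dp.1])] else acc
          if dp.2 ≠ "" then acc ++ [dget requested_dict dp.2] else acc) []
    PySem.Str.join " " tokens

-- ===== PRECONDITION & SPEC =====
-- Pre_ excludes (a) strings whose length is not 2 — the function is documented for two-digit numbers only,
-- and A's generic branch would read digits beyond the second — and (b) inputs where a lookup A performs
-- raises KeyError (exactly the keys A's taken branch reads).
def preChars (cs : List Char) (requested_dict : List (String × String)) : Bool :=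
  match cs with
  | [a, b] =>
    if a = '0' then (PySem.Dict.mk requested_dict).contains (String.ofList [b])
    else (PySem.Dict.mk requested_dict).contains "10" &&
         (a == '1' || (PySem.Dict.mk requested_dict).contains (String.ofList [a])) &&
         (b == '0' || (PySem.Dict.mk requested_dict).contains (String.ofList [b]))
  | _ => false

def Pre_len_two (convert_num : String) (requested_dict : List (String × String)) : Prop :=
  preChars convert_num.toList requested_dict = true
instance (convert_num : String) (requested_dict : List (String × String)) : Decidable (Pre_len_two convert_num requested_dict) := by unfold Pre_len_two; infer_instance

def pvWitness_len_two : String × (List (String × String)) :=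
  ("42", [("4", "yon"), ("2", "ni"), ("10", "juu")])

def Spec_len_two (convert_num : String) (requested_dict : List (String × String)) (out : String) : Prop := out = len_two_alt convert_num requested_dict
instance (convert_num : String) (requested_dict : List (String × String)) (out : String) : Decidable (Spec_len_two convert_num requested_dict out) := by unfold Spec_len_two; infer_instance

-- ===== CLAIM (what is proved, stated in full; the proofs are below) =====
def Claim_equal_len_two : Prop := ∀ (convert_num : String) (requested_dict : List (String × String)), Dom_len_two convert_num requested_dict → Pre_len_two convert_num requested_dict → Spec_len_two convert_num requested_dict (len_two convert_num requested_dict)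

-- ===== LEMMAS AND PROOFS =====

-- the ' '.join of two tokens, on the character-list side
lemma join_two (u v : List Char) : PySem.Chars.join [' '] [u, v] = u ++ ' ' :: v := by
  simp [PySem.Chars.join, List.intercalate, List.intersperse]

-- the ' '.join of three tokens, on the character-list side
lemma join_three (u v w : List Char) :
    PySem.Chars.join [' '] [u, v, w] = u ++ ' ' :: (v ++ ' ' :: w) := by
  simp [PySem.Chars.join, List.intercalate, List.intersperse]

-- A's trailing-space trim: s[:len(s)-1] drops the final char
lemma trim_last (l : List Char) :
    PySem.List.slice (l ++ [' ']) none (some (((l ++ [' ']).length : Int) - 1)) = l := by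
  have h : ((l ++ [' ']).length : Int) - 1 = ((l.length : Nat) : Int) := by simp
  rw [h, PySem.List.slice_to_natCast]; simp

-- A's generic branch, after its folds are evaluated: trimming the trailing space of "x y z "
lemma final_slice (x y z : String) :
    PySem.List.slice (x.toList ++ ' ' :: (y.toList ++ ' ' :: (z.toList ++ [' '])))
      none (some ((x.length : Int) + ((y.length : Int) + ((z.length : Int) + 1 + 1) + 1) - 1))
    = x.toList ++ ' ' :: (y.toList ++ ' ' :: z.toList) := by
  have hl : x.toList ++ ' ' :: (y.toList ++ ' ' :: (z.toList ++ [' ']))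
      = (x.toList ++ ' ' :: (y.toList ++ ' ' :: z.toList)) ++ [' '] := by simp
  have hb : (x.length : Int) + ((y.length : Int) + ((z.length : Int) + 1 + 1) + 1) - 1
      = (((x.toList ++ ' ' :: (y.toList ++ ' ' :: z.toList)) ++ [' ']).length : Int) - 1 := by
    simp [← String.length_toList]
  rw [hb, hl, trim_last]

-- ===== VERDICT (by name: the statement is the Claim_ definition above) =====
theorem len_two_spec : Claim_equal_len_two := by
  intro s d _ hpre
  unfold Spec_len_two
  unfold Pre_len_two at hpre
  obtain ⟨a, b, hs⟩ : ∃ a b, s.toList = [a, b] := by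
    rcases hcs : s.toList with _ | ⟨a, _ | ⟨b, _ | _⟩⟩ <;>
      first
      | exact ⟨_, _, rfl⟩
      | (rw [hcs] at hpre; simp [preChars] at hpre)
  have hs10 : (s = "10") ↔ (a = '1' ∧ b = '0') := by
    rw [← String.toList_inj, hs]
    constructor
    · intro h
      injection h with h1 h2; injection h2 with h3 _
      exact ⟨h1, h3⟩
    · rintro ⟨rfl, rfl⟩; rfl
  by_cases ha0 : a = '0'
  · -- leading zero: both take the early return
    simp [len_two, len_two_alt, len_one, hs, ha0]
  · by_cases ha1 : a = '1'
    · by_cases hb0 : b = '0'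
      · -- the number is exactly "10"
        have h10 : s = "10" := hs10.mpr ⟨ha1, hb0⟩
        simp [len_two, len_two_alt, h10,
              PySem.Str.join, PySem.Chars.join, List.intercalate]
      · -- 1x with x ≠ 0: "10" plus the ones digit
        have h10 : ¬ s = "10" := by rw [hs10]; tauto
        apply String.toList_inj.mp
        simp [len_two, len_two_alt, len_one, hs, ha1, hb0, h10, join_two]
    · by_cases hb0 : b = '0'
      · -- x0 with x ∉ {0,1}: tens digit plus "10"
        have h10 : ¬ s = "10" := by rw [hs10]; tauto
        apply String.toList_inj.mp
        simp [len_two, len_two_alt, len_one, hs, ha0, ha1, hb0, h10, join_two]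
      · -- generic two-digit case: A's list-build/insert/concat/trim vs B's three-token join
        have h10 : ¬ s = "10" := by rw [hs10]; tauto
        apply String.toList_inj.mp
        simp [len_two, len_two_alt, hs, ha0, ha1, hb0, h10, PySem.List.insert,
              PySem.List.sliceIndices, PySem.Str.join, join_three]
        exact final_slice (dget d (String.ofList [a])) (dget d "10") (dget d (String.ofList [b]))
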